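-- pv_equiv track=rewrite | github.com/alisemihural/mimicry | mimicry.py | completeMissingMoves
-- ===== SOURCE A (Python) =====
-- def completeMissingMoves(sequence, length):
--     """
--     Build a final sequence of exactly 'length' moves for order checking.
--     Inserts missing moves in their correct positions based on the ideal order.
--
--     Example:
--     User types [2, 3, 4, 5] for length=5 -> Result: [1, 2, 3, 4, 5]
--     User types [2, 3, 5] for length=5 -> Result: [1, 2, 3, 4, 5]
--     """
--     ideal_sequence = list(range(1, length + 1))
--     user_sequence_set = set(abs(num) for num in sequence)
--
--     # Create the final sequence
--     final_sequence = []
--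
--     if len(sequence) < length:
--         for i in ideal_sequence:
--             if i in user_sequence_set:
--                 # Keep the user's version (positive or negative)
--                 for num in sequence:
--                     if abs(num) == i:
--                         final_sequence.append(num)
--                         break
--             else:
--                 # Insert the ideal move if it's missing
--                 final_sequence.append(i)
--
--         return final_sequence
--
--     else:
--         return sequence
-- ===== SOURCE B (Python) =====
-- def completeMissingMoves(sequence, length):
--     if len(sequence) >= length:
--         return sequence
--     first = {}
--     for num in sequence:
--         a = abs(num)
--         if a not in first:
--             first[a] = num
--     return [first.get(i, i) for i in range(1, length + 1)]
-- ===== Notes on version B (the rewrite author's own statement) =====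
-- stated objective: faster
-- what changed: Replaced the inner linear scan of the sequence for every ideal position with a dict mapping abs(num) to its first occurrence, built once, so the result is a single comprehension over range(1, length+1).
import Mathlib
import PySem

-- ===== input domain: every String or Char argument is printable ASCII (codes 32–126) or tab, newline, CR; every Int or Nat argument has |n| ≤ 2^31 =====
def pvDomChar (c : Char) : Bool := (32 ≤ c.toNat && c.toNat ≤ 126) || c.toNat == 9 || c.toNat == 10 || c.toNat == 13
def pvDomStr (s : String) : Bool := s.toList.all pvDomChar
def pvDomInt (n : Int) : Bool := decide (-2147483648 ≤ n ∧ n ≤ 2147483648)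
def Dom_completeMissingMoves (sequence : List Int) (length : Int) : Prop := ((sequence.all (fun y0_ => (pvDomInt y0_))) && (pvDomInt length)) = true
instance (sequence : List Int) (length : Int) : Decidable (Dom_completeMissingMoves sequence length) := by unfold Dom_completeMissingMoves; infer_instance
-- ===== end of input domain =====

-- B replaces A's per-position inner scan with a first-occurrence dict built once (asymptotically faster); return value only.

-- ===== PORT A =====
-- inner loop 'for num in sequence: if abs(num) == i: append; break' — returns the appended element, if any
def pvFindAbs : List Int → Int → Option Int
  | [], _ => none
  | n :: t, i => if |n| = i then some n else pvFindAbs t i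

def completeMissingMoves (sequence : List Int) (length : Int) : List Int :=
  let ideal := PySem.List.pyRange 1 (length + 1) 1
  let uset : PySem.Set Int := PySem.Set.ofList (sequence.map (fun n => |n|))
  if (sequence.length : Int) < length then
    ideal.foldl (fun acc i =>
      if PySem.Set.contains uset i then
        match pvFindAbs sequence i with
        | some n => acc ++ [n]
        | none => acc
      else acc ++ [i]) []
  else sequence

-- ===== PORT B =====
def pvFirstAbsDict (sequence : List Int) : PySem.Dict Int Int :=
  sequence.foldl (fun d n => if d.contains |n| then d else d.insert |n| n) PySem.Dict.empty

def completeMissingMoves_alt (sequence : List Int) (length : Int) : List Int :=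
  if (sequence.length : Int) ≥ length then sequence
  else
    let first := pvFirstAbsDict sequence
    (PySem.List.pyRange 1 (length + 1) 1).map (fun i => first.getD i i)

-- ===== PRECONDITION & SPEC =====
def Spec_completeMissingMoves (sequence : List Int) (length : Int) (out : List Int) : Prop := out = completeMissingMoves_alt sequence length
instance (sequence : List Int) (length : Int) (out : List Int) : Decidable (Spec_completeMissingMoves sequence length out) := by unfold Spec_completeMissingMoves; infer_instance

-- ===== CLAIM (what is proved, stated in full; the proofs are below) =====
def Claim_equal_completeMissingMoves : Prop := ∀ (sequence : List Int) (length : Int), Dom_completeMissingMoves sequence length → Spec_completeMissingMoves sequence length (completeMissingMoves sequence length)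

-- ===== LEMMAS AND PROOFS =====

-- the dict-building fold looks up to the first matching element
theorem pvFirstAbsDict_get? (sequence : List Int) (i : Int) (d : PySem.Dict Int Int) :
    (sequence.foldl (fun d n => if d.contains |n| then d else d.insert |n| n) d).get? i
      = (d.get? i).or (pvFindAbs sequence i) := by
  induction sequence generalizing d with
  | nil => simp [pvFindAbs]
  | cons n t ih =>
    simp only [List.foldl_cons, pvFindAbs]
    by_cases hc : d.contains |n| = true
    · simp only [hc, if_true, ih]
      by_cases hi : |n| = i
      · subst hi
        rw [PySem.Dict.contains_eq_isSome_get?] at hc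
        obtain ⟨v, hv⟩ := Option.isSome_iff_exists.mp hc
        simp [hv]
      · rw [if_neg hi]
    · rw [if_neg hc, ih]
      by_cases hi : |n| = i
      · subst hi
        have hd : d.get? |n| = none := by
          rw [PySem.Dict.contains_eq_isSome_get?] at hc
          simpa using hc
        simp [PySem.Dict.get?_insert_self, hd]
      · rw [PySem.Dict.get?_insert_of_ne _ _ (fun h => hi h.symm), if_neg hi]

theorem pvFindAbs_eq_none_iff (sequence : List Int) (i : Int) :
    pvFindAbs sequence i = none ↔ ∀ n ∈ sequence, |n| ≠ i := by
  induction sequence with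
  | nil => simp [pvFindAbs]
  | cons n t ih =>
    by_cases h : |n| = i <;> simp [pvFindAbs, h, ih]

theorem pvFindAbs_some (xs : List Int) (i n : Int) (h : pvFindAbs xs i = some n) :
    n ∈ xs ∧ |n| = i := by
  induction xs with
  | nil => cases h
  | cons m t ih =>
    by_cases hm : |m| = i
    · simp only [pvFindAbs, if_pos hm] at h
      cases h; exact ⟨List.mem_cons_self, hm⟩
    · simp only [pvFindAbs, if_neg hm] at h
      obtain ⟨h1, h2⟩ := ih h
      exact ⟨List.mem_cons_of_mem _ h1, h2⟩

-- per ideal position, A's branch value equals B's dict lookup, as a one-element list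
theorem per_elem (sequence : List Int) (i : Int) :
    (if PySem.Set.contains (PySem.Set.ofList (sequence.map (fun n => |n|))) i then
        match pvFindAbs sequence i with
        | some n => [n]
        | none => ([] : List Int)
      else [i])
      = [(pvFirstAbsDict sequence).getD i i] := by
  have hget : (pvFirstAbsDict sequence).get? i = pvFindAbs sequence i := by
    simpa using pvFirstAbsDict_get? sequence i PySem.Dict.empty
  rcases h : pvFindAbs sequence i with _ | n
  · have hc : PySem.Set.contains (PySem.Set.ofList (sequence.map (fun n => |n|))) i = false := by
      apply Bool.eq_false_iff.mpr
      intro hct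
      rw [PySem.Set.contains_iff] at hct
      simp only [PySem.Set.mem_ofList, List.mem_map] at hct
      obtain ⟨m, hm, hab⟩ := hct
      exact (pvFindAbs_eq_none_iff sequence i).mp h m hm hab
    rw [hc, PySem.Dict.getD_eq_get?_getD, hget, h]
    simp
  · obtain ⟨hmem, hab⟩ := pvFindAbs_some sequence i n h
    have hc : PySem.Set.contains (PySem.Set.ofList (sequence.map (fun n => |n|))) i = true := by
      rw [PySem.Set.contains_iff]
      simp only [PySem.Set.mem_ofList, List.mem_map]
      exact ⟨n, hmem, hab⟩
    rw [hc, PySem.Dict.getD_eq_get?_getD, hget, h]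
    simp

-- A's append loop over the ideal range is B's map
theorem fold_eq (sequence : List Int) (l : List Int) (acc : List Int) :
    (l.foldl (fun acc i =>
      if PySem.Set.contains (PySem.Set.ofList (sequence.map (fun n => |n|))) i then
        match pvFindAbs sequence i with
        | some n => acc ++ [n]
        | none => acc
      else acc ++ [i]) acc)
      = acc ++ l.map (fun i => (pvFirstAbsDict sequence).getD i i) := by
  induction l generalizing acc with
  | nil => simp
  | cons i t ih =>
    have hb : (if PySem.Set.contains (PySem.Set.ofList (sequence.map (fun n => |n|))) i then
        match pvFindAbs sequence i with
        | some n => acc ++ [n]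
        | none => acc
      else acc ++ [i]) = acc ++ [(pvFirstAbsDict sequence).getD i i] := by
      rw [← per_elem sequence i]
      by_cases hc : PySem.Set.contains (PySem.Set.ofList (sequence.map (fun n => |n|))) i = true
      · rcases hf : pvFindAbs sequence i with _ | n <;> rw [hc] <;> simp
      · rw [Bool.not_eq_true] at hc
        rw [hc]
        simp
    simp only [List.foldl_cons, List.map_cons]
    rw [ih, hb, List.append_assoc]
    rfl

-- ===== VERDICT (by name: the statement is the Claim_ definition above) =====
theorem completeMissingMoves_spec : Claim_equal_completeMissingMoves := by
  intro sequence length _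
  unfold Spec_completeMissingMoves completeMissingMoves completeMissingMoves_alt
  by_cases h : (sequence.length : Int) < length
  · rw [if_pos h, if_neg (show ¬ (sequence.length : Int) ≥ length by omega)]
    simpa using fold_eq sequence (PySem.List.pyRange 1 (length + 1) 1) []
  · rw [if_neg h, if_pos (show (sequence.length : Int) ≥ length by omega)]
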